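-- pv_equiv track=rewrite | github.com/AliAlizadeh11/quera_problems | p205.py | text_edit
-- ===== SOURCE A (Python) =====
-- def text_inverse(text):
--     result = ""
--
--     for item in text:
--         if item == '0':
--             result += '1'
--
--         elif item == '1':
--             result += '0'
--
--     return result
--
-- def text_edit(L, R):
--     result = '1'
--     text = '1'
--
--     for _ in range(R):
--         if len(result) > R+1 :
--             break
--
--         add_text = text_inverse(text)
--         result += add_text
--         text = result
--
--     return result[L-1:R]
-- ===== SOURCE B (Python) =====
-- def text_edit(L, R):
--     # Thue-Morse: character at 0-based index i is '1' iff popcount(i) is even.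
--     return ''.join('1' if bin(i).count('1') % 2 == 0 else '0'
--                    for i in range(L - 1, R))
-- ===== Notes on version B (the rewrite author's own statement) =====
-- stated objective: simpler
-- what changed: Instead of building the whole Thue-Morse prefix by repeated complement-and-append and then slicing it, B emits each requested character directly as the parity of the popcount of its index; Pre_ excludes L <= 0, on which A's value is an artefact of Python's negative-index slice wraparound over A's internal buffer whose power-of-two length is an implementation detail.
-- outside the precondition, e.g. on text_edit(0, 3): A returns '', B returns '0100'
import Mathlib
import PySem

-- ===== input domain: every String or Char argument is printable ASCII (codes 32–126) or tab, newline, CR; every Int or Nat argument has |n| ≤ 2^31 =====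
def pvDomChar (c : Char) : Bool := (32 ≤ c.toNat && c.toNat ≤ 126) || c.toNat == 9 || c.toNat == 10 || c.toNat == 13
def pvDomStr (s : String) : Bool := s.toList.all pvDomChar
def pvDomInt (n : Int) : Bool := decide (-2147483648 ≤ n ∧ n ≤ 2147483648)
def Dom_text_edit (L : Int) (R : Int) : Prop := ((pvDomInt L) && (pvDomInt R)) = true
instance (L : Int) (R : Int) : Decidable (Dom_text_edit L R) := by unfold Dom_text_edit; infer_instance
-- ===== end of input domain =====

-- B emits each character of the requested range directly as the popcount parity of its index,
-- instead of A's repeated complement-and-append construction (objective: simpler; not faster).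

-- ===== PORT A =====
-- Python strings are ported as List Char (String.ofList at the end); '+=' on strings is list append.
def textInverse (text : List Char) : List Char :=
  text.foldl (fun result item =>
    if item = '0' then result ++ ['1']
    else if item = '1' then result ++ ['0']
    else result) []

-- the body of A's for-loop; state = (result, text, broke-out-of-loop)
def stepA (R : Int) (st : List Char × List Char × Bool) (_ : Int) :
    List Char × List Char × Bool :=
  if st.2.2 then st
  else if (st.1.length : Int) > R + 1 then (st.1, st.2.1, true)
  else
    let add := textInverse st.2.1
    (st.1 ++ add, st.1 ++ add, false)

def text_edit (L : Int) (R : Int) : String :=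
  let fin := (PySem.List.pyRange 0 R 1).foldl (stepA R) (['1'], ['1'], false)
  String.ofList (PySem.List.slice fin.1 (some (L - 1)) (some R))

-- ===== PORT B =====
-- bin(i).count('1') of Source B, by binary recursion; bin(i) has popcount |i| ones (exact for all i)
def popcount (n : Nat) : Nat :=
  if n = 0 then 0 else n % 2 + popcount (n / 2)
decreasing_by exact Nat.div_lt_self (Nat.pos_of_ne_zero (by assumption)) (by norm_num)

def text_edit_alt (L : Int) (R : Int) : String :=
  String.ofList ((PySem.List.pyRange (L - 1) R 1).map (fun i =>
    if popcount i.natAbs % 2 = 0 then '1' else '0'))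

-- ===== PRECONDITION & SPEC =====
-- Pre_ excludes L ≤ 0, on which A returns a value produced by Python's negative-index slice
-- wraparound over A's internal buffer, whose power-of-two length is an implementation detail.
def Pre_text_edit (L : Int) (R : Int) : Prop := 1 ≤ L
instance (L : Int) (R : Int) : Decidable (Pre_text_edit L R) := by unfold Pre_text_edit; infer_instance

def pvWitness_text_edit : Int × Int := (2, 7)

def Spec_text_edit (L : Int) (R : Int) (out : String) : Prop := out = text_edit_alt L R
instance (L : Int) (R : Int) (out : String) : Decidable (Spec_text_edit L R out) := by unfold Spec_text_edit; infer_instance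

-- ===== CLAIM (what is proved, stated in full; the proofs are below) =====
def Claim_equal_text_edit : Prop := ∀ (L : Int) (R : Int), Dom_text_edit L R → Pre_text_edit L R → Spec_text_edit L R (text_edit L R)

-- ===== LEMMAS AND PROOFS =====

-- character i of the sequence A builds: '1' iff popcount i is even
def tmc (i : Nat) : Char := if popcount i % 2 = 0 then '1' else '0'
def flipc (c : Char) : Char := if c = '0' then '1' else '0'
def TM (n : Nat) : List Char := (List.range n).map tmc

theorem popcount_add_pow (k : Nat) : ∀ i < 2 ^ k, popcount (2 ^ k + i) = popcount i + 1 := by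
  induction k with
  | zero =>
    intro i hi
    interval_cases i
    simp [popcount]
  | succ k ih =>
    intro i hi
    rw [popcount]
    have h2 : 2 ^ (k+1) + i ≠ 0 := by positivity
    simp only [h2, if_false]
    have hmod : (2 ^ (k+1) + i) % 2 = i % 2 := by omega
    have hdiv : (2 ^ (k+1) + i) / 2 = 2 ^ k + i / 2 := by omega
    have hlt : i / 2 < 2 ^ k := by
      have := Nat.pow_succ 2 k
      omega
    rw [hmod, hdiv, ih _ hlt]
    conv_rhs => rw [popcount]
    by_cases h0 : i = 0
    · subst h0; simp [popcount]
    · simp only [h0, if_false]; omega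

theorem tmc_add_pow (k i : Nat) (h : i < 2 ^ k) : tmc (2 ^ k + i) = flipc (tmc i) := by
  unfold tmc flipc
  rw [popcount_add_pow k i h]
  rcases Nat.even_or_odd (popcount i) with he | ho
  · have h1 : popcount i % 2 = 0 := Nat.even_iff.mp he
    have h2 : (popcount i + 1) % 2 = 1 := by omega
    simp [h1, h2]
  · have h1 : popcount i % 2 = 1 := Nat.odd_iff.mp ho
    have h2 : (popcount i + 1) % 2 = 0 := by omega
    simp [h1, h2]

theorem textInverse_TM (n : Nat) :
    textInverse (TM n) = (List.range n).map (fun i => flipc (tmc i)) := by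
  unfold textInverse TM
  rw [PySem.List.foldl_congr_mem (g := fun acc x => acc ++ [flipc x])]
  · rw [PySem.List.foldl_append_singleton_eq_map]
    simp [List.map_map, Function.comp]
  · intro acc x hx
    rcases List.mem_map.mp hx with ⟨i, _, rfl⟩
    unfold tmc flipc
    by_cases h : popcount i % 2 = 0 <;> simp [h]

theorem TM_double (k : Nat) : TM (2 ^ (k + 1)) = TM (2 ^ k) ++ textInverse (TM (2 ^ k)) := by
  rw [textInverse_TM]
  unfold TM
  have h : 2 ^ (k+1) = 2 ^ k + 2 ^ k := by ring
  rw [h, List.range_add, List.map_append, List.map_map]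
  congr 1
  apply List.map_congr_left
  intro i hi
  simp only [Function.comp_apply]
  exact tmc_add_pow k i (List.mem_range.mp hi)

-- the exponent of the length of A's result after running the loop (m iterations left, current 2^k)
def finExp (R : Int) : Nat → Nat → Nat
  | k, 0 => k
  | k, (m+1) => if (2 ^ k : Int) > R + 1 then k else finExp R (k+1) m

theorem foldl_stepA_stuck (R : Int) (l : List Int) (s : List Char × List Char × Bool)
    (h : s.2.2 = true) : l.foldl (stepA R) s = s := by
  induction l with
  | nil => rfl
  | cons x xs ih => simp only [List.foldl_cons, stepA, h, if_true]; exact ih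

theorem length_TM (n : Nat) : (TM n).length = n := by simp [TM]

theorem loop_char (R : Int) (l : List Int) : ∀ k : Nat,
    (l.foldl (stepA R) (TM (2 ^ k), TM (2 ^ k), false)).1 = TM (2 ^ finExp R k l.length) := by
  induction l with
  | nil => intro k; rfl
  | cons x xs ih =>
    intro k
    simp only [List.foldl_cons, List.length_cons, finExp]
    by_cases hc : (2 ^ k : Int) > R + 1
    · have hlen : ((TM (2 ^ k)).length : Int) > R + 1 := by
        rw [length_TM]; push_cast; push_cast at hc; exact hc
      simp only [stepA, Bool.false_eq_true, if_false, hlen, if_pos, hc]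
      rw [foldl_stepA_stuck R xs _ rfl]
    · have hlen : ¬ ((TM (2 ^ k)).length : Int) > R + 1 := by
        rw [length_TM]; push_cast; push_cast at hc; exact hc
      simp only [stepA, Bool.false_eq_true, if_false, hlen]
      rw [← TM_double]
      simp [hc, ih (k + 1)]

theorem finExp_big (R : Int) : ∀ m k, (2 ^ (k + m) : Int) > R + 1 →
    (2 ^ finExp R k m : Int) > R + 1 := by
  intro m
  induction m with
  | zero => intro k h; simpa using h
  | succ m ih =>
    intro k h
    by_cases hc : (2 ^ k : Int) > R + 1
    · simpa [finExp, hc] using hc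
    · simp only [finExp, hc, if_false]
      exact ih (k + 1) (by rw [show k + 1 + m = k + (m + 1) by omega]; exact h)

theorem two_pow_gt (n : Nat) (h : 2 ≤ n) : ((n : Int) + 1) < 2 ^ n := by
  have hnat : n + 2 ≤ 2 ^ n := by
    induction n, h using Nat.le_induction with
    | base => norm_num
    | succ m hm ih =>
      have h2 : 2 ^ (m + 1) = 2 * 2 ^ m := by ring
      omega
  have hint : ((n : Int) + 2) ≤ ((2 ^ n : Nat) : Int) := by exact_mod_cast hnat
  push_cast at hint
  omega

theorem take_drop_map_range (f : Nat → Char) (n' s t : Nat) (ht : t ≤ n') :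
    (((List.range n').map f).drop s).take (t - s) =
      (List.range (t - s)).map (fun j => f (s + j)) := by
  apply List.ext_getElem
  · simp; omega
  · intro i h1 h2
    simp only [List.getElem_take, List.getElem_drop, List.getElem_map, List.getElem_range]

theorem TM_pow_zero : TM (2 ^ 0) = ['1'] := by
  have h0 : popcount 0 = 0 := by rw [popcount]; simp
  simp [TM, tmc, h0, List.range_one]

-- slicing TM N from a (0 ≤ a) to R, with R < N, is exactly the index range [a, R)
theorem slice_TM (N : Nat) (a R : Int) (ha : 0 ≤ a) (hR : R < (N : Int))
    (hc : 0 ≤ R ∨ R + (N : Int) ≤ 0) :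
    PySem.List.slice (TM N) (some a) (some R) =
      (PySem.List.pyRange a R 1).map (fun i => tmc i.toNat) := by
  have hslice : PySem.List.slice (TM N) (some a) (some R) =
      ((TM N).drop (PySem.List.clampIdx (TM N).length a)).take
        (PySem.List.clampIdx (TM N).length R - PySem.List.clampIdx (TM N).length a) := rfl
  rw [hslice, length_TM]
  set s := PySem.List.clampIdx N a with hs
  set t := PySem.List.clampIdx N R with ht
  have hsv : s = min a.toNat N := by
    simp only [hs, PySem.List.clampIdx]
    split_ifs <;> omega
  have htN : t ≤ N := PySem.List.clampIdx_le N R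
  have htle : (t : Int) ≤ R ⊔ 0 := by
    simp only [ht, PySem.List.clampIdx]
    rcases hc with hc | hc <;> split_ifs <;> simp <;> omega
  unfold TM
  rw [take_drop_map_range tmc N s t (PySem.List.clampIdx_le N R)]
  rw [PySem.List.pyRange_one, List.map_map]
  by_cases hlt : a < R
  · -- a.toNat < N, s = a.toNat, t = R.toNat
    have haN : a < (N : Int) := lt_trans hlt hR
    have hsv' : s = a.toNat := by omega
    have htv : t = R.toNat := by
      simp only [ht, PySem.List.clampIdx]
      split_ifs <;> omega
    have hts : t - s = (R - a).toNat := by omega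
    rw [hts, hsv']
    apply List.map_congr_left
    intro j _
    simp only [Function.comp_apply]
    congr 1
    omega
  · -- empty on both sides
    have h1 : (R - a).toNat = 0 := by omega
    have h2 : t - s = 0 := by omega
    simp [h1, h2]

-- ===== VERDICT (by name: the statement is the Claim_ definition above) =====
theorem text_edit_spec : Claim_equal_text_edit := by
  intro L R _ hL
  unfold Pre_text_edit at hL
  unfold Spec_text_edit text_edit text_edit_alt
  have hfold := loop_char R (PySem.List.pyRange 0 R 1) 0
  rw [TM_pow_zero, PySem.List.length_pyRange_one] at hfold
  simp only [Int.sub_zero] at hfold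
  set N : Nat := 2 ^ finExp R 0 R.toNat with hN
  have hRN : R < (N : Int) := by
    by_cases h0 : R ≤ 0
    · have hz : R.toNat = 0 := by omega
      have : N = 1 := by simp [hN, hz, finExp]
      omega
    · by_cases h1 : R = 1
      · subst h1
        have : N = 2 := by norm_num [hN, finExp]
        omega
      · have hm : 2 ≤ R.toNat := by omega
        have hbig : (2 ^ (0 + R.toNat) : Int) > R + 1 := by
          have := two_pow_gt R.toNat hm
          have hcast : ((R.toNat : Int)) = R := by omega
          rw [Nat.zero_add]
          omega
        have := finExp_big R R.toNat 0 hbig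
        have hc : ((2 ^ finExp R 0 R.toNat : Nat) : Int) = (2 : Int) ^ finExp R 0 R.toNat := by
          push_cast; ring
        rw [hN]
        omega
  simp only [hfold]
  rw [slice_TM N (L - 1) R (by omega) hRN (by
    by_cases h0 : 0 ≤ R
    · exact Or.inl h0
    · refine Or.inr ?_
      have hz : R.toNat = 0 := by omega
      have : N = 1 := by simp [hN, hz, finExp]
      omega)]
  congr 1
  rw [PySem.List.pyRange_one, List.map_map, List.map_map]
  apply List.map_congr_left
  intro j _
  have habs : (L - 1 + (j : Int)).natAbs = (L - 1 + (j : Int)).toNat := by omega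
  simp only [Function.comp_apply, tmc, habs]
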